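-- pv_equiv track=rewrite | github.com/pauloALuis/LP | SeriesDeProblemas3/pc1.py | get_tuple_info
-- ===== SOURCE A (Python) =====
-- def get_tuple_info(t: tuple = ("abcd acd", "a ab efghij", "a abc efgh lalaal")):
--     l = []
--     t2 = ("", "", "")
--     counter = 0
--     highest = ""
--     lowest = ""
--     for string in t:
--         for word in string.split(" "):
--             if counter == 0:
--                 lowest = word
--                 highest = word
--             if len(word) > len(highest):
--                 highest = word
--             if len(word) < len(lowest):
--                 lowest = word
--             counter +=1
--         t2 = (len(string), highest, lowest)
--         counter = 0
--         l.append(t2)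
--     return l
-- ===== SOURCE B (Python) =====
-- def get_tuple_info(t: tuple = ("abcd acd", "a ab efghij", "a abc efgh lalaal")):
--     out = []
--     for s in t:
--         words = s.split(" ")
--         lens = [len(w) for w in words]
--         out.append((len(s), words[lens.index(max(lens))], words[lens.index(min(lens))]))
--     return out
-- ===== Notes on version B (the rewrite author's own statement) =====
-- stated objective: alternative
-- what changed: Replaces A's single tracking scan with counter/highest/lowest state by staged passes over an integer projection: build the list of word lengths once, take max/min of the plain integers, and recover each extreme word by a positional lens.index lookup (first occurrence = A's first-wins tie-break).
import Mathlib
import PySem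

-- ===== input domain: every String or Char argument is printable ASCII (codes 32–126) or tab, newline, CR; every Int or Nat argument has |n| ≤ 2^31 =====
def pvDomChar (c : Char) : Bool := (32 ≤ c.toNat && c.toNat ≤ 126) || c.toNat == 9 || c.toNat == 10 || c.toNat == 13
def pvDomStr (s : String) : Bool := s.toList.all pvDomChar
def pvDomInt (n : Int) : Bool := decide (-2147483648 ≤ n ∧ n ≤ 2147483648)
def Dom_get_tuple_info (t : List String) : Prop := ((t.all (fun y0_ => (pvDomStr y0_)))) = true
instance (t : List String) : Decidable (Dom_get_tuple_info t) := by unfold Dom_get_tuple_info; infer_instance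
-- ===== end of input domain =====

-- B replaces A's counter/highest/lowest tracking scan by staged passes: a word-length
-- projection list, integer max/min over it, and a first-occurrence index lookup (alternative decomposition; same cost).


-- ===== PORT A =====
-- inner loop body: one word of A's 'for word in string.split(" ")'
def aInner (st : Int × String × String) (word : String) : Int × String × String :=
  let counter := st.1
  let highest := st.2.1
  let lowest := st.2.2
  let lowest := if counter == 0 then word else lowest
  let highest := if counter == 0 then word else highest
  let highest := if PySem.Str.len word > PySem.Str.len highest then word else highest
  let lowest := if PySem.Str.len word < PySem.Str.len lowest then word else lowest
  (counter + 1, highest, lowest)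

-- outer loop body: one string of A's 'for string in t'
def aStep (acc : List (Int × String × String) × Int × String × String) (string : String) :
    List (Int × String × String) × Int × String × String :=
  let l := acc.1
  let st := ((PySem.Str.split? string " ").getD []).foldl aInner acc.2
  let t2 := (PySem.Str.len string, st.2.1, st.2.2)
  (l ++ [t2], 0, st.2.1, st.2.2)

def get_tuple_info (t : List String) : List (Int × String × String) :=
  (t.foldl aStep ([], 0, "", "")).1

-- ===== PORT B =====
-- one string of B's loop: lengths list, integer max/min, first-occurrence index lookup
def bOne (s : String) : Int × String × String :=
  let words := (PySem.Str.split? s " ").getD []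
  let lens := words.map PySem.Str.len
  let hi := ((PySem.List.index? lens ((PySem.List.max? lens (fun y => y)).getD 0)).bind
              (fun i => PySem.List.pyGet? words (i : Int))).getD ""
  let lo := ((PySem.List.index? lens ((PySem.List.min? lens (fun y => y)).getD 0)).bind
              (fun i => PySem.List.pyGet? words (i : Int))).getD ""
  (PySem.Str.len s, hi, lo)

def get_tuple_info_alt (t : List String) : List (Int × String × String) :=
  t.foldl (fun out s => out ++ [bOne s]) []

-- ===== PRECONDITION & SPEC =====
def Spec_get_tuple_info (t : List String) (out : List (Int × String × String)) : Prop := out = get_tuple_info_alt t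
instance (t : List String) (out : List (Int × String × String)) : Decidable (Spec_get_tuple_info t out) := by unfold Spec_get_tuple_info; infer_instance

-- ===== CLAIM =====
def Claim_equal_get_tuple_info : Prop := ∀ (t : List String), Dom_get_tuple_info t → Spec_get_tuple_info t (get_tuple_info t)

-- ===== LEMMAS AND PROOFS =====

def maxStep (m w : String) : String := if PySem.Str.len m < PySem.Str.len w then w else m
def minStep (m w : String) : String := if PySem.Str.len w < PySem.Str.len m then w else m

theorem aInner_zero (h l w : String) : aInner (0, h, l) w = (1, w, w) := by
  simp [aInner]

theorem aInner_pos (c : Int) (hc : 0 < c) (h l w : String) :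
    aInner (c, h, l) w = (c + 1, maxStep h w, minStep l w) := by
  have : (c == 0) = false := by simp; omega
  simp [aInner, maxStep, minStep, this]

theorem foldl_aInner_pos (rest : List String) : ∀ (c : Int), 0 < c → ∀ (h l : String),
    rest.foldl aInner (c, h, l) =
      (c + rest.length, rest.foldl maxStep h, rest.foldl minStep l) := by
  induction rest with
  | nil => intro c hc h l; simp
  | cons w ws ih =>
      intro c hc h l
      rw [List.foldl_cons, aInner_pos c hc, ih (c + 1) (by omega)]
      simp [List.foldl_cons]
      omega

theorem foldl_aInner_start (ws : List String) (w : String) (rest : List String)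
    (hws : ws = w :: rest) (h l : String) :
    ws.foldl aInner (0, h, l) =
      ((ws.length : Int), rest.foldl maxStep w, rest.foldl minStep w) := by
  subst hws
  rw [List.foldl_cons, aInner_zero, foldl_aInner_pos rest 1 (by omega)]
  simp
  omega

theorem splitOn_go_ne_nil (sep : List Char) (fuel : Nat) :
    ∀ (l cur : List Char) (acc : List (List Char)),
      PySem.Chars.splitOn.go sep fuel l cur acc ≠ [] := by
  induction fuel with
  | zero => intro l cur acc; simp [PySem.Chars.splitOn.go]
  | succ n ih =>
      intro l cur acc
      cases l with
      | nil => simp [PySem.Chars.splitOn.go]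
      | cons c rest =>
          rw [PySem.Chars.splitOn.go]
          split
          · exact ih _ _ _
          · exact ih _ _ _

theorem split_space_ne_nil (s : String) : (PySem.Str.split? s " ").getD [] ≠ [] := by
  have h := splitOn_go_ne_nil [' '] (s.toList.length + 1) s.toList [] []
  simp only [PySem.Str.split?, PySem.Chars.split?, PySem.Chars.splitOn]
  simp only [show (" ".toList) = [' '] from rfl, List.isEmpty_cons, if_false,
    Bool.false_eq_true, Option.map_some, Option.getD_some, ne_eq, List.map_eq_nil_iff]
  exact h

-- index-into-projection lookup is first match on the projected value
theorem index_bind_get (f : String → Int) (v : Int) : ∀ (ws : List String),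
    (PySem.List.index? (ws.map f) v).bind (fun i => PySem.List.pyGet? ws (i : Int))
      = ws.find? (fun x => f x == v) := by
  intro ws
  induction ws with
  | nil => rfl
  | cons x xs ih =>
      by_cases hx : f x = v
      · subst hx
        rw [List.map_cons, PySem.List.index?_cons_self (f x) (xs.map f),
            List.find?_cons_of_pos (by simp)]
        simp
      · rw [List.map_cons, PySem.List.index?_cons_of_ne (xs.map f) hx,
            List.find?_cons_of_neg (by simp only [beq_iff_eq]; exact hx), ← ih]
        cases h : PySem.List.index? (xs.map f) v with
        | none => simp
        | some i =>
            simp only [Option.map_some, Option.bind_some]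
            have : ((i + 1 : Nat) : Int) = ((i : Nat) : Int) + 1 := by push_cast; ring
            rw [this, PySem.List.pyGet?_cons_succ]

theorem len_maxStep (w x : String) :
    PySem.Str.len (maxStep w x) = max (PySem.Str.len w) (PySem.Str.len x) := by
  simp only [maxStep]
  split <;> omega

theorem len_minStep (w x : String) :
    PySem.Str.len (minStep w x) = min (PySem.Str.len w) (PySem.Str.len x) := by
  simp only [minStep]
  split <;> omega

-- the first word whose length equals the running max IS A's first-wins fold
theorem find_max_eq_fold : ∀ (rest : List String) (w : String),
    (w :: rest).find?
        (fun x => PySem.Str.len x == (rest.map PySem.Str.len).foldl max (PySem.Str.len w))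
      = some (rest.foldl maxStep w) := by
  intro rest
  induction rest with
  | nil =>
      intro w
      rw [List.find?_cons_of_pos (by simp)]
      rfl
  | cons x xs ih =>
      intro w
      have hstep := len_maxStep w x
      have hML : List.foldl max (PySem.Str.len w) (List.map PySem.Str.len (x :: xs))
          = List.foldl max (PySem.Str.len (maxStep w x)) (List.map PySem.Str.len xs) := by
        rw [List.map_cons, List.foldl_cons, ← hstep]
      have hbound := (PySem.List.le_foldl_max (xs.map PySem.Str.len) (PySem.Str.len (maxStep w x))).1
      rw [show ((x :: xs).map PySem.Str.len).foldl max (PySem.Str.len w)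
            = List.foldl max (PySem.Str.len w) (List.map PySem.Str.len (x :: xs)) from rfl,
          hML,
          show List.foldl maxStep w (x :: xs) = List.foldl maxStep (maxStep w x) xs from rfl]
      by_cases hwx : PySem.Str.len w < PySem.Str.len x
      · have hme : maxStep w x = x := by simp only [maxStep, if_pos hwx]
        rw [hme] at hbound ⊢
        have hwM : PySem.Str.len w
            ≠ List.foldl max (PySem.Str.len x) (List.map PySem.Str.len xs) := by omega
        rw [List.find?_cons_of_neg (by simp only [beq_iff_eq]; exact hwM)]
        exact ih x
      · have hme : maxStep w x = w := by simp only [maxStep, if_neg hwx]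
        rw [hme] at hbound ⊢
        by_cases hw : PySem.Str.len w = List.foldl max (PySem.Str.len w) (List.map PySem.Str.len xs)
        · have := ih w
          rw [List.find?_cons_of_pos (by simp only [beq_iff_eq]; exact hw)] at this ⊢
          exact this
        · have hxM : PySem.Str.len x
              ≠ List.foldl max (PySem.Str.len w) (List.map PySem.Str.len xs) := by
            intro hxe; omega
          have := ih w
          rw [List.find?_cons_of_neg (by simp only [beq_iff_eq]; exact hw)] at this
          rw [List.find?_cons_of_neg (by simp only [beq_iff_eq]; exact hw),
              List.find?_cons_of_neg (by simp only [beq_iff_eq]; exact hxM)]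
          exact this

theorem find_min_eq_fold : ∀ (rest : List String) (w : String),
    (w :: rest).find?
        (fun x => PySem.Str.len x == (rest.map PySem.Str.len).foldl min (PySem.Str.len w))
      = some (rest.foldl minStep w) := by
  intro rest
  induction rest with
  | nil =>
      intro w
      rw [List.find?_cons_of_pos (by simp)]
      rfl
  | cons x xs ih =>
      intro w
      have hstep := len_minStep w x
      have hML : List.foldl min (PySem.Str.len w) (List.map PySem.Str.len (x :: xs))
          = List.foldl min (PySem.Str.len (minStep w x)) (List.map PySem.Str.len xs) := by
        rw [List.map_cons, List.foldl_cons, ← hstep]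
      have hbound := (PySem.List.foldl_min_le (xs.map PySem.Str.len) (PySem.Str.len (minStep w x))).1
      rw [show ((x :: xs).map PySem.Str.len).foldl min (PySem.Str.len w)
            = List.foldl min (PySem.Str.len w) (List.map PySem.Str.len (x :: xs)) from rfl,
          hML,
          show List.foldl minStep w (x :: xs) = List.foldl minStep (minStep w x) xs from rfl]
      by_cases hwx : PySem.Str.len x < PySem.Str.len w
      · have hme : minStep w x = x := by simp only [minStep, if_pos hwx]
        rw [hme] at hbound ⊢
        have hwM : PySem.Str.len w
            ≠ List.foldl min (PySem.Str.len x) (List.map PySem.Str.len xs) := by omega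
        rw [List.find?_cons_of_neg (by simp only [beq_iff_eq]; exact hwM)]
        exact ih x
      · have hme : minStep w x = w := by simp only [minStep, if_neg hwx]
        rw [hme] at hbound ⊢
        by_cases hw : PySem.Str.len w = List.foldl min (PySem.Str.len w) (List.map PySem.Str.len xs)
        · have := ih w
          rw [List.find?_cons_of_pos (by simp only [beq_iff_eq]; exact hw)] at this ⊢
          exact this
        · have hxM : PySem.Str.len x
              ≠ List.foldl min (PySem.Str.len w) (List.map PySem.Str.len xs) := by
            intro hxe; omega
          have := ih w
          rw [List.find?_cons_of_neg (by simp only [beq_iff_eq]; exact hw)] at this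
          rw [List.find?_cons_of_neg (by simp only [beq_iff_eq]; exact hw),
              List.find?_cons_of_neg (by simp only [beq_iff_eq]; exact hxM)]
          exact this

theorem bOne_eq (s : String) (w : String) (rest : List String)
    (hws : (PySem.Str.split? s " ").getD [] = w :: rest) :
    bOne s = (PySem.Str.len s, rest.foldl maxStep w, rest.foldl minStep w) := by
  simp only [bOne, hws]
  rw [List.map_cons, PySem.List.max?_id_cons, PySem.List.min?_id_cons]
  simp only [Option.getD_some]
  rw [← List.map_cons, index_bind_get, index_bind_get, find_max_eq_fold, find_min_eq_fold]
  rfl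

theorem aStep_fst (l : List (Int × String × String)) (h lo : String) (s : String) :
    aStep (l, 0, h, lo) s = (l ++ [bOne s], 0, (bOne s).2.1, (bOne s).2.2) := by
  obtain ⟨w, rest, hws⟩ := List.exists_cons_of_ne_nil (split_space_ne_nil s)
  have hb := bOne_eq s w rest hws
  simp [aStep, foldl_aInner_start _ w rest hws, hb]

theorem foldl_aStep (t : List String) : ∀ (l : List (Int × String × String)) (h lo : String),
    (t.foldl aStep (l, 0, h, lo)).1 = t.foldl (fun out s => out ++ [bOne s]) l := by
  induction t with
  | nil => intro l h lo; simp
  | cons s ss ih =>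
      intro l h lo
      rw [List.foldl_cons, aStep_fst, ih]
      rfl

-- ===== VERDICT =====
theorem get_tuple_info_spec : Claim_equal_get_tuple_info := by
  intro t _
  show get_tuple_info t = get_tuple_info_alt t
  rw [get_tuple_info, foldl_aStep, get_tuple_info_alt]
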